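-- pv_equiv track=rewrite | github.com/zerofcs/med-doi-feature-extraction | src/extractors/base.py | normalize_choice
-- ===== SOURCE A (Python) =====
-- from typing import Dict, Any, Optional, List, Tuple
--
-- def normalize_choice(value: Optional[str], allowed: List[str]) -> Optional[str]:
--     """
--     Normalize a free-text choice to an allowed option (case-insensitive).
--
--     Falls back to 'Other' when available if no close match can be found.
--
--     Args:
--         value: User-provided value
--         allowed: List of allowed values
--
--     Returns:
--         Normalized value or None
--     """
--     if value is None:
--         return None
--     v = str(value).strip()
--
--     # Exact case-insensitive match
--     for opt in allowed:
--         if v.lower() == opt.lower():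
--             return opt
--
--     # Contains match
--     for opt in allowed:
--         if opt.lower() in v.lower() or v.lower() in opt.lower():
--             return opt
--
--     # Fallback to Other
--     for opt in allowed:
--         if opt.lower() == 'other':
--             return opt
--
--     return v
-- ===== SOURCE B (Python) =====
-- def normalize_choice(value, allowed):
--     if value is None:
--         return None
--     v = str(value).strip()
--     v_lower = v.lower()
--     contains = None
--     other = None
--     for opt in allowed:
--         opt_lower = opt.lower()
--         if v_lower == opt_lower:
--             return opt
--         if contains is None and (opt_lower in v_lower or v_lower in opt_lower):
--             contains = opt
--         if other is None and opt_lower == 'other':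
--             other = opt
--     if contains is not None:
--         return contains
--     if other is not None:
--         return other
--     return v
-- ===== Notes on version B (the rewrite author's own statement) =====
-- stated objective: simpler
-- what changed: Replaces A's three sequential scans over allowed (exact, contains, 'other') with one single pass that early-returns on an exact match and records the first contains and first 'other' options in two first-seen variables, combining them after the loop.
import Mathlib
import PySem

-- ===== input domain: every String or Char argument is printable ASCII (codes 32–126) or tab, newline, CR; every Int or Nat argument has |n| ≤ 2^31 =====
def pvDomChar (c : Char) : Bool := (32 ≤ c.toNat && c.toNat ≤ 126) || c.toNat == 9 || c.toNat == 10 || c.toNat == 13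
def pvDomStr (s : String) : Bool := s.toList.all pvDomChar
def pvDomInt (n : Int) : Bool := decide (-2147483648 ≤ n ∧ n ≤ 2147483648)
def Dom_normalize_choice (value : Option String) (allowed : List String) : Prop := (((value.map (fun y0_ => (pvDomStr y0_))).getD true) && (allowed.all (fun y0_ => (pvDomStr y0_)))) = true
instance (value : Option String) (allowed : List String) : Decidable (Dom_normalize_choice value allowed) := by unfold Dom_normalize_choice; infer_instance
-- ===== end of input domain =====

-- B replaces A's three sequential scans over `allowed` with one single pass that records the
-- first exact / contains / 'other' matches (objective: simpler, one traversal instead of three).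

-- ===== PORT A =====
-- first loop: exact case-insensitive match
def nc_scan1 (v : String) : List String → Option String
  | [] => none
  | opt :: rest =>
    if PySem.Str.lower v == PySem.Str.lower opt then some opt else nc_scan1 v rest

-- second loop: contains match
def nc_scan2 (v : String) : List String → Option String
  | [] => none
  | opt :: rest =>
    if PySem.Str.isIn (PySem.Str.lower opt) (PySem.Str.lower v)
        || PySem.Str.isIn (PySem.Str.lower v) (PySem.Str.lower opt)
    then some opt else nc_scan2 v rest

-- third loop: fallback to 'other'
def nc_scan3 : List String → Option String
  | [] => none
  | opt :: rest => if PySem.Str.lower opt == "other" then some opt else nc_scan3 rest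

def normalize_choice (value : Option String) (allowed : List String) : Option String :=
  match value with
  | none => none
  | some value =>
    let v := PySem.Str.strip value
    match nc_scan1 v allowed with
    | some opt => some opt
    | none =>
      match nc_scan2 v allowed with
      | some opt => some opt
      | none =>
        match nc_scan3 allowed with
        | some opt => some opt
        | none => some v

-- ===== PORT B =====
-- single loop: early return on exact match, first-seen accumulators for contains / 'other'
def ncb_loop (v vl : String) (contains other : Option String) : List String → String
  | [] =>
    match contains with
    | some c => c
    | none =>
      match other with
      | some o => o
      | none => v
  | opt :: rest =>
    let ol := PySem.Str.lower opt
    if vl == ol then opt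
    else
      let contains' :=
        if contains.isNone && (PySem.Str.isIn ol vl || PySem.Str.isIn vl ol)
        then some opt else contains
      let other' := if other.isNone && (ol == "other") then some opt else other
      ncb_loop v vl contains' other' rest

def normalize_choice_alt (value : Option String) (allowed : List String) : Option String :=
  value.map (fun value =>
    let v := PySem.Str.strip value
    ncb_loop v (PySem.Str.lower v) none none allowed)

-- ===== PRECONDITION & SPEC =====
def Spec_normalize_choice (value : Option String) (allowed : List String) (out : Option String) : Prop := out = normalize_choice_alt value allowed
instance (value : Option String) (allowed : List String) (out : Option String) : Decidable (Spec_normalize_choice value allowed out) := by unfold Spec_normalize_choice; infer_instance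

-- ===== CLAIM (what is proved, stated in full; the proofs are below) =====
def Claim_equal_normalize_choice : Prop := ∀ (value : Option String) (allowed : List String), Dom_normalize_choice value allowed → Spec_normalize_choice value allowed (normalize_choice value allowed)

-- ===== LEMMAS AND PROOFS =====

-- B's single pass equals the cascade of A's three scans, for arbitrary accumulator states.
theorem ncb_loop_eq (v : String) (allowed : List String) :
    ∀ (c o : Option String),
      ncb_loop v (PySem.Str.lower v) c o allowed =
        ((nc_scan1 v allowed).or ((c.or (nc_scan2 v allowed)).or
          (o.or (nc_scan3 allowed)))).getD v := by
  induction allowed with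
  | nil =>
    intro c o
    cases c <;> cases o <;> simp [ncb_loop, nc_scan1, nc_scan2, nc_scan3, Option.or]
  | cons opt rest ih =>
    intro c o
    simp only [ncb_loop, nc_scan1, nc_scan2, nc_scan3]
    by_cases h1 : PySem.Str.lower v == PySem.Str.lower opt
    · simp [h1]
    · simp only [h1, Bool.false_eq_true, if_false, ih]
      cases c <;> cases o <;> split_ifs <;> simp_all [Option.or]

-- ===== VERDICT (by name: the statement is the Claim_ definition above) =====
theorem normalize_choice_spec : Claim_equal_normalize_choice := by
  intro value allowed _
  unfold Spec_normalize_choice normalize_choice normalize_choice_alt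
  cases value with
  | none => rfl
  | some s =>
    simp only [Option.map_some]
    rw [ncb_loop_eq]
    cases h1 : nc_scan1 (PySem.Str.strip s) allowed <;>
      cases h2 : nc_scan2 (PySem.Str.strip s) allowed <;>
      cases h3 : nc_scan3 allowed <;>
      simp [Option.or]
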